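-- pv_equiv track=rewrite | github.com/gridvisi/Python_workspace | Zero 2 Hero Class/Input_output/7 kyu Drawing a Cross.py | draw_a_cross
-- ===== SOURCE A (Python) =====
-- def draw_a_cross(n):
--     ans = ''
--     if n%2==0 and n>3:
--         return 'Centered cross not possible!'
--     elif n <= 3:
--         return 'Not possible to draw cross for grids less than 3x3!'
--     else:
--         for i in range(n):
--             start = [" "] * n
--             start[i],start[n-i-1] = "x","x"
--             ans += ''.join(start) +"\n"
--         return ans[:-1]
-- ===== SOURCE B (Python) =====
-- def draw_a_cross(n):
--     if n % 2 == 0 and n > 3: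
--         return 'Centered cross not possible!'
--     if n <= 3:
--         return 'Not possible to draw cross for grids less than 3x3!'
--     h = n // 2
--     top = [' ' * i + 'x' + ' ' * (n - 2 * i - 2) + 'x' + ' ' * i for i in range(h)]
--     center = ' ' * h + 'x' + ' ' * h
--     return '\n'.join(top + [center] + top[::-1])
-- ===== Notes on version B (the rewrite author's own statement) =====
-- stated objective: alternative
-- what changed: B exploits the cross's vertical symmetry: it builds only the top h=n//2 rows by run-length string arithmetic (' '*i + 'x' + ' '*(n-2i-2) + 'x' + ' '*i), makes the center row, and mirrors the top list for the bottom half, instead of A's loop over all n rows that preallocates a space list, writes two indices and accumulates with a trailing newline trimmed at the end.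
import Mathlib
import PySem

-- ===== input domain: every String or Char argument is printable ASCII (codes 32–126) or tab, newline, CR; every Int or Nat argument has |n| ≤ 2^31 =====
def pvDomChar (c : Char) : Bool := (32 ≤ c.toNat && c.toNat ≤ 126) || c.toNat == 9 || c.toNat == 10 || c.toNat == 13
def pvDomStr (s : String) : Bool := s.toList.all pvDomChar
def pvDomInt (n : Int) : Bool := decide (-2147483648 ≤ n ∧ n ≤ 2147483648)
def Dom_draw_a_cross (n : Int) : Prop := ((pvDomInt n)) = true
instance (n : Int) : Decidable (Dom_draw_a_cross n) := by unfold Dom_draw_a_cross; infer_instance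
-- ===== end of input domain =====

-- B builds only the top n//2 rows by run-length string arithmetic and mirrors them for the bottom half; alternative decomposition, same cost.
-- ===== PORT A =====
def draw_a_cross (n : Int) : String :=
  if n % 2 == 0 && decide (n > 3) then "Centered cross not possible!"
  else if n ≤ 3 then "Not possible to draw cross for grids less than 3x3!"
  else
    let ans := (PySem.List.pyRange 0 n 1).foldl (fun ans i =>
      let start := List.replicate n.toNat " "
      let start := start.set i.toNat "x"
      let start := start.set (n - i - 1).toNat "x"
      ans ++ PySem.Str.join "" start ++ "\n") ""
    PySem.Str.slice ans none (some (-1))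

-- ===== PORT B =====
def draw_a_cross_alt (n : Int) : String :=
  if n % 2 == 0 && decide (n > 3) then "Centered cross not possible!"
  else if n ≤ 3 then "Not possible to draw cross for grids less than 3x3!"
  else
    let h := PySem.Int.floordiv n 2
    let top := (PySem.List.pyRange 0 h 1).map (fun i =>
      String.ofList (List.replicate i.toNat ' ' ++ ['x'] ++
        List.replicate (n - 2*i - 2).toNat ' ' ++ ['x'] ++ List.replicate i.toNat ' '))
    let center := String.ofList (List.replicate h.toNat ' ' ++ ['x'] ++ List.replicate h.toNat ' ')
    PySem.Str.join "\n" (top ++ [center] ++ top.reverse)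

-- ===== PRECONDITION & SPEC =====
def Spec_draw_a_cross (n : Int) (out : String) : Prop := out = draw_a_cross_alt n
instance (n : Int) (out : String) : Decidable (Spec_draw_a_cross n out) := by unfold Spec_draw_a_cross; infer_instance

-- ===== CLAIM (what is proved, stated in full; the proofs are below) =====
def Claim_equal_draw_a_cross : Prop := ∀ (n : Int), Dom_draw_a_cross n → Spec_draw_a_cross n (draw_a_cross n)

-- ===== LEMMAS AND PROOFS =====

-- the characters of row i of the cross, indexed by column
def pvCharRow (n i : Int) : List Char :=
  (PySem.List.pyRange 0 n 1).map (fun j => if j == i || j == n - 1 - i then 'x' else ' ')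

-- A's accumulation loop, on the character level: each step appends its row's characters and a newline.
theorem pvFoldlChars (l : List Int) (f : Int → String) (a0 : String) :
    (l.foldl (fun a x => a ++ f x ++ "\n") a0).toList
      = a0.toList ++ l.flatMap (fun x => (f x).toList ++ ['\n']) := by
  induction l generalizing a0 with
  | nil => simp
  | cons x t ih => simp [ih]

-- Dropping the last character of rows-each-followed-by-newline yields the newline-join of the rows.
theorem pvDropLastJoin (l : List Int) (g : Int → List Char) (hl : l ≠ []) :
    (l.flatMap (fun x => g x ++ ['\n'])).dropLast = PySem.Chars.join ['\n'] (l.map g) := by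
  induction l with
  | nil => simp at hl
  | cons x t ih =>
    cases t with
    | nil => simp [PySem.Chars.join_singleton]
    | cons y u =>
      have hne : (y :: u).flatMap (fun x => g x ++ ['\n']) ≠ [] := by simp
      rw [List.flatMap_cons, List.dropLast_append_of_ne_nil hne, ih (by simp)]
      simp [PySem.Chars.join_cons_cons]

-- A's row (space list with two cells overwritten, joined) equals the column-indexed row, for 0 ≤ i < n.
theorem pvRowEqA (n i : Int) (h0 : 0 ≤ i) (h1 : i < n) :
    (PySem.Str.join "" (((List.replicate n.toNat " ").set i.toNat "x").set (n - i - 1).toNat "x")).toList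
      = pvCharRow n i := by
  unfold pvCharRow
  rw [PySem.Str.toList_join,
      show (((List.replicate n.toNat " ").set i.toNat "x").set (n - i - 1).toNat "x").map String.toList
        = (((List.replicate n.toNat ' ').set i.toNat 'x').set (n - i - 1).toNat 'x').map (fun c => [c]) from by
          simp [List.map_set],
      show ("" : String).toList = ([] : List Char) from rfl,
      PySem.Chars.join_nil_singletons]
  apply List.ext_getElem
  · rw [List.length_set, List.length_set, List.length_replicate,
        List.length_map, PySem.List.length_pyRange_one]
    omega
  · intro k hk1 hk2
    have hkn : k < n.toNat := by
      rw [List.length_set, List.length_set, List.length_replicate] at hk1; exact hk1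
    rw [List.getElem_map, PySem.List.getElem_pyRange_one]
    rw [List.getElem_set, List.getElem_set, List.getElem_replicate]
    split_ifs with c1 c2 c3 c4
    all_goals try rfl
    all_goals exfalso
    all_goals simp only [beq_iff_eq, Bool.or_eq_true, not_or] at *
    all_goals omega

-- B's top row (three space runs around two 'x') equals the column-indexed row, for 0 ≤ i, 2i+1 < n.
theorem pvRowEqTop (n i : Int) (h0 : 0 ≤ i) (h1 : 2*i + 1 < n) :
    List.replicate i.toNat ' ' ++ ['x'] ++
      List.replicate (n - 2*i - 2).toNat ' ' ++ ['x'] ++ List.replicate i.toNat ' '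
      = pvCharRow n i := by
  unfold pvCharRow
  apply List.ext_getElem
  · simp [PySem.List.length_pyRange_one]; omega
  · intro k hk1 hk2
    rw [List.getElem_map, PySem.List.getElem_pyRange_one]
    simp only [List.getElem_append, List.length_append, List.length_replicate,
      List.length_cons, List.length_nil, List.getElem_replicate, List.getElem_cons]
    split_ifs
    all_goals first
      | rfl
      | (exfalso; simp only [beq_iff_eq, Bool.or_eq_true, not_or] at *; omega)

-- B's center row equals the column-indexed row at i = h, for n = 2h+1.
theorem pvRowEqCenter (n h : Int) (h0 : 0 ≤ h) (hn : n = 2*h + 1) :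
    List.replicate h.toNat ' ' ++ ['x'] ++ List.replicate h.toNat ' ' = pvCharRow n h := by
  unfold pvCharRow
  apply List.ext_getElem
  · simp [PySem.List.length_pyRange_one]; omega
  · intro k hk1 hk2
    rw [List.getElem_map, PySem.List.getElem_pyRange_one]
    simp only [List.getElem_append, List.length_append, List.length_replicate,
      List.length_cons, List.length_nil, List.getElem_replicate, List.getElem_cons]
    split_ifs
    all_goals first
      | rfl
      | (exfalso; simp only [beq_iff_eq, Bool.or_eq_true, not_or] at *; omega)

-- the cross is vertically symmetric: row n-1-i equals row i
theorem pvCharRow_symm (n i : Int) : pvCharRow n (n - 1 - i) = pvCharRow n i := by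
  unfold pvCharRow
  apply List.map_congr_left
  intro j _
  have : (j == n - 1 - i || j == n - 1 - (n - 1 - i)) = (j == i || j == n - 1 - i) := by
    have : n - 1 - (n - 1 - i) = i := by omega
    rw [this, Bool.or_comm]
  rw [this]

-- the full list of rows is top ++ center ++ mirrored top, for n = 2h+1
theorem pvRowsSplit (n h : Int) (h0 : 0 ≤ h) (hn : n = 2*h + 1) :
    (PySem.List.pyRange 0 n 1).map (pvCharRow n)
      = (PySem.List.pyRange 0 h 1).map (pvCharRow n) ++ [pvCharRow n h]
        ++ ((PySem.List.pyRange 0 h 1).map (pvCharRow n)).reverse := by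
  rw [PySem.List.pyRange_one_append 0 h n (by omega) (by omega),
      PySem.List.pyRange_one_append h (h+1) n (by omega) (by omega),
      PySem.List.pyRange_one_singleton]
  simp only [List.map_append, List.map_cons, List.map_nil, List.append_assoc]
  congr 2
  apply List.ext_getElem
  · simp [PySem.List.length_pyRange_one]; omega
  · intro k hk1 hk2
    rw [List.getElem_map, PySem.List.getElem_pyRange_one, List.getElem_reverse,
        List.getElem_map, PySem.List.getElem_pyRange_one]
    simp only [List.length_map]
    have hl : (PySem.List.pyRange 0 h 1).length = h.toNat := by
      simp [PySem.List.length_pyRange_one]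
    have hk : k < (n - (h+1)).toNat := by
      simpa [PySem.List.length_pyRange_one] using hk1
    have : (0 : Int) + ((PySem.List.pyRange 0 h 1).length - 1 - k : Nat)
        = n - 1 - (h + 1 + k) := by
      rw [hl]; omega
    rw [this, pvCharRow_symm]

-- ===== VERDICT (by name: the statement is the Claim_ definition above) =====
theorem draw_a_cross_spec : Claim_equal_draw_a_cross := by
  intro n _
  unfold Spec_draw_a_cross draw_a_cross draw_a_cross_alt
  by_cases h1 : (n % 2 == 0 && decide (n > 3)) = true
  · simp [h1]
  · simp only [h1, if_false, Bool.false_eq_true]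
    by_cases h2 : n ≤ 3
    · simp [h2]
    · simp only [h2, if_false]
      -- n > 3 and n is odd: n = 2h + 1 with h = n // 2
      have hodd : n % 2 ≠ 0 := by
        intro h; apply h1
        simp [h, decide_eq_true_eq]; omega
      have hmod : n % 2 = 1 := by omega
      set h := PySem.Int.floordiv n 2 with hh
      have hfd : PySem.Int.floordiv n 2 = n / 2 :=
        PySem.Int.floordiv_eq_ediv_of_pos (by omega)
      have hn : n = 2*h + 1 := by rw [hh, hfd]; omega
      have hpos : 0 ≤ h := by omega
      apply String.toList_inj.mp
      rw [PySem.Str.slice_to_neg_one, pvFoldlChars]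
      rw [show ("" : String).toList = ([] : List Char) from rfl, List.nil_append]
      have hnil : PySem.List.pyRange 0 n 1 ≠ [] := by
        rw [PySem.List.pyRange_one_cons (by omega)]; simp
      rw [List.flatMap_congr (g := fun i => pvCharRow n i ++ ['\n'])
          (fun i hi => by
            have hmem := (PySem.List.mem_pyRange_one).mp hi
            rw [pvRowEqA n i hmem.1 hmem.2]),
        pvDropLastJoin _ (pvCharRow n) hnil]
      rw [PySem.Str.toList_join]
      rw [show ("\n" : String).toList = ['\n'] from rfl]
      have htop : (PySem.List.pyRange 0 h 1).map
          (String.toList ∘ fun i => String.ofList (List.replicate i.toNat ' ' ++ ['x'] ++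
            List.replicate (n - 2*i - 2).toNat ' ' ++ ['x'] ++ List.replicate i.toNat ' '))
          = (PySem.List.pyRange 0 h 1).map (pvCharRow n) := by
        apply List.map_congr_left
        intro i hi
        have hmem := (PySem.List.mem_pyRange_one).mp hi
        simp only [Function.comp_apply, String.toList_ofList]
        exact pvRowEqTop n i hmem.1 (by omega)
      congr 1
      rw [List.map_append, List.map_append, List.map_map, List.map_reverse, List.map_map, htop]
      simp only [List.map_cons, List.map_nil, String.toList_ofList]
      rw [pvRowEqCenter n h hpos hn, pvRowsSplit n h hpos hn]
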